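-- pv_equiv track=rewrite | github.com/beinganuvesh/Cheatsheet-DS-ALGO | Second Attempt.py | Roti
-- ===== SOURCE A (Python) =====
-- def Roti(arr, p):
--     arr.sort()
--     low=0
--     m=max(arr)
--     high=(m*(p)*(p+1))//2
--     ans=0
--
--     while low<=high:
--         mid=low+(high-low)//2
--         if CanCook(arr, p, mid):
--             ans=mid
--             high=mid-1
--         else:
--             low=mid+1
--     return ans
--
-- def CanCook(arr, p, allowed):
--     n=len(arr)
--     time=0
--     paratha=0
--
--     for i in range(0, n):
--         time=arr[i]
--         j=2
--         while time<=allowed: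
--             paratha+=1
--             time+=(j*arr[i])
--             j+=1
--         if paratha>=p:
--             return True
--
--     return False
-- ===== SOURCE B (Python) =====
-- def Roti(arr, p):
--     # p-th smallest completion time: the multiset of per-cook completion times
--     # r*k*(k+1)//2 (k = 1..p per cook), sorted, at index p-1.  (Like A, sorts
--     # arr in place; the proved equivalence is about the return value.)
--     arr.sort()
--     if p <= 0:
--         return 0
--     times = [r * k * (k + 1) // 2 for r in arr for k in range(1, p + 1)]
--     times.sort()
--     return times[p - 1]
-- ===== Notes on version B (the rewrite author's own statement) =====
-- stated objective: alternative
-- what changed: Replaces the binary search over allowed time (with a per-probe paratha-counting simulation) by direct selection: build each cook's first p completion times r*k(k+1)/2, sort the combined list once and return its (p-1)-th element, which is the p-th smallest completion time.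
-- outside the precondition, e.g. on Roti([-3], 1): A returns 0, B returns -3; on Roti([-1, -2], 5): A returns 0, B returns -10
import Mathlib
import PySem

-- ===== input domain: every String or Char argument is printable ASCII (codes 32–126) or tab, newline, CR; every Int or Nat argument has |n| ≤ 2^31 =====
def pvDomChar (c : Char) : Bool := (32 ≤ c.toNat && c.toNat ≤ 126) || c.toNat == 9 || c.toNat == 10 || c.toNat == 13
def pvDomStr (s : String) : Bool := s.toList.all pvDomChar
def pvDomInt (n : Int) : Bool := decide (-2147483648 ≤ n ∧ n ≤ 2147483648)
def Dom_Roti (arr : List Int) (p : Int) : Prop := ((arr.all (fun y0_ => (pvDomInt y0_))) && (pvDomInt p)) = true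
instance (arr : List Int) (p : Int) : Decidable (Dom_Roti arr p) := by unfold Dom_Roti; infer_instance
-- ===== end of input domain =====

-- B replaces A's binary search over time by directly selecting the p-th smallest
-- completion time from a sorted list of per-cook completion times (same return
-- value; like A, B sorts arr in place — the equivalence proved is about the return value).

-- ===== PORT A =====
-- inner 'while time<=allowed' loop of CanCook (fuel makes it total; under Pre_ the fuel suffices)
def cookInner (r allowed : Int) : Nat → Int → Int → Int → Int
  | 0, _, _, paratha => paratha
  | fuel + 1, time, j, paratha =>
    if time ≤ allowed then cookInner r allowed fuel (time + j * r) (j + 1) (paratha + 1)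
    else paratha

-- 'for i in range(0, n)' loop of CanCook
def canCookGo (p allowed : Int) : List Int → Int → Bool
  | [], _ => false
  | r :: rest, paratha =>
    let paratha' := cookInner r allowed (allowed.toNat + 1) r 2 paratha
    if p ≤ paratha' then true else canCookGo p allowed rest paratha'

def CanCook (arr : List Int) (p allowed : Int) : Bool := canCookGo p allowed arr 0

def bsGo (arr : List Int) (p : Int) (low high ans : Int) : Int :=
  if _h : low ≤ high then
    let mid := low + PySem.Int.floordiv (high - low) 2
    if CanCook arr p mid then bsGo arr p low (mid - 1) mid
    else bsGo arr p (mid + 1) high ans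
  else ans
termination_by (high + 1 - low).toNat
decreasing_by
  · have h2 : PySem.Int.floordiv (high - low) 2 = (high - low) / 2 :=
      PySem.Int.floordiv_eq_ediv_of_pos (by omega)
    have h3 : 0 ≤ (high - low) / 2 := Int.ediv_nonneg (by omega) (by omega)
    have h4 : (high - low) / 2 ≤ high - low := Int.ediv_le_self 2 (by omega)
    omega
  · have h2 : PySem.Int.floordiv (high - low) 2 = (high - low) / 2 :=
      PySem.Int.floordiv_eq_ediv_of_pos (by omega)
    have h3 : 0 ≤ (high - low) / 2 := Int.ediv_nonneg (by omega) (by omega)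
    have h4 : (high - low) / 2 ≤ high - low := Int.ediv_le_self 2 (by omega)
    omega

def Roti (arr : List Int) (p : Int) : Int :=
  let s := PySem.List.sorted arr (fun x => x)
  match PySem.List.max? s (fun x => x) with
  | none => 0    -- max(arr) raises ValueError on the empty list: excluded by Pre_
  | some m => bsGo s p 0 (PySem.Int.floordiv (m * p * (p + 1)) 2) 0

-- ===== PORT B =====
def Roti_alt (arr : List Int) (p : Int) : Int :=
  let s := PySem.List.sorted arr (fun x => x)
  if p ≤ 0 then 0
  else
    let times := s.flatMap (fun r =>
      (PySem.List.pyRange 1 (p + 1) 1).map (fun k => PySem.Int.floordiv (r * k * (k + 1)) 2))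
    PySem.List.pyGetD (times.mergeSort (fun a b => decide (a ≤ b))) (p - 1) 0
    -- times.sort() is ported as mergeSort: on an Int list it returns the same value as
    -- Python's stable sort (sorted permutations of an Int list coincide) and evaluates
    -- without the deep recursion of the insertion-sort primitive on large lists;
    -- times[p-1] is in range under Pre_ (arr ≠ [] gives len(times) = n*p ≥ p)

-- ===== PRECONDITION & SPEC =====
-- Pre_ excludes the empty list (A's max() raises ValueError) and lists containing a
-- non-positive cooking rate, outside the task's natural domain: there A either loops
-- forever (some rate ≤ 0 with a nonnegative search bound) or returns an accidental 0
-- because the search bound max*p*(p+1)//2 is negative.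
def Pre_Roti (arr : List Int) (p : Int) : Prop := arr ≠ [] ∧ ∀ x ∈ arr, 1 ≤ x
instance (arr : List Int) (p : Int) : Decidable (Pre_Roti arr p) := by unfold Pre_Roti; infer_instance
def pvWitness_Roti : List Int × Int := ([2, 3], 4)

def Spec_Roti (arr : List Int) (p : Int) (out : Int) : Prop := out = Roti_alt arr p
instance (arr : List Int) (p : Int) (out : Int) : Decidable (Spec_Roti arr p out) := by unfold Spec_Roti; infer_instance

-- ===== CLAIM (what is proved, stated in full; the proofs are below) =====
def Claim_equal_Roti : Prop := ∀ (arr : List Int) (p : Int), Dom_Roti arr p → Pre_Roti arr p → Spec_Roti arr p (Roti arr p)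

-- ===== LEMMAS AND PROOFS =====

-- triangular numbers: tri k = 1 + 2 + ... + k
def tri : Nat → Nat
  | 0 => 0
  | k + 1 => tri k + (k + 1)

theorem two_tri (k : Nat) : 2 * tri k = k * (k + 1) := by
  induction k with
  | zero => rfl
  | succ n ih =>
    show 2 * (tri n + (n + 1)) = (n + 1) * (n + 2)
    rw [Nat.mul_add, ih]; ring

theorem le_tri (k : Nat) : k ≤ tri k := by
  induction k with
  | zero => simp [tri]
  | succ n ih => simp only [tri]; omega

theorem tri_mono {a b : Nat} (h : a ≤ b) : tri a ≤ tri b := by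
  induction b, h using Nat.le_induction with
  | base => exact Nat.le_refl _
  | succ n _ ih => exact le_trans ih (by simp [tri])

-- number of k ≥ m with r * tri k ≤ t (the guard m ≤ t.toNat only forces termination)
def cntFrom (r t : Int) (m : Nat) : Nat :=
  if h : r * (tri m : Int) ≤ t ∧ m ≤ t.toNat then 1 + cntFrom r t (m + 1) else 0
termination_by t.toNat + 1 - m
decreasing_by omega

theorem cntFrom_eq (r t : Int) (m : Nat) (hr : 1 ≤ r) (hm : 1 ≤ m) :
    cntFrom r t m = if r * (tri m : Int) ≤ t then 1 + cntFrom r t (m + 1) else 0 := by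
  rw [cntFrom]
  by_cases hc : r * (tri m : Int) ≤ t
  · have h1 : (m : Int) ≤ (tri m : Int) := by exact_mod_cast le_tri m
    have h2 : (tri m : Int) ≤ r * (tri m : Int) :=
      le_mul_of_one_le_left (by exact_mod_cast Nat.zero_le _) hr
    have hmt : m ≤ t.toNat := by omega
    simp [hc, hmt]
  · simp [hc]

theorem cond_upward (r t : Int) (hr : 1 ≤ r) {m k : Nat} (h : m ≤ k)
    (hk : r * (tri k : Int) ≤ t) : r * (tri m : Int) ≤ t := by
  refine le_trans ?_ hk
  have : (tri m : Int) ≤ (tri k : Int) := by exact_mod_cast tri_mono h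
  exact mul_le_mul_of_nonneg_left this (by omega)

theorem cntFrom_bound (r t : Int) :
    ∀ fueln m, t.toNat + 1 - m ≤ fueln → m ≤ t.toNat + 1 → cntFrom r t m + m ≤ t.toNat + 1 := by
  intro fueln
  induction fueln with
  | zero =>
    intro m h1 h2
    have hm : m = t.toNat + 1 := by omega
    rw [cntFrom]
    have : ¬ (r * (tri m : Int) ≤ t ∧ m ≤ t.toNat) := by omega
    simp [this]; omega
  | succ n ih =>
    intro m h1 h2
    rw [cntFrom]
    by_cases hc : r * (tri m : Int) ≤ t ∧ m ≤ t.toNat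
    · have := ih (m + 1) (by omega) (by omega)
      simp [hc]; omega
    · simp [hc]; omega

theorem cookInner_eq (r t : Int) (hr : 1 ≤ r) :
    ∀ fuel m (paratha : Int), 1 ≤ m → cntFrom r t m < fuel →
      cookInner r t fuel (r * (tri m : Int)) ((m : Int) + 1) paratha
        = paratha + (cntFrom r t m : Int) := by
  intro fuel
  induction fuel with
  | zero => intro m paratha _ h; omega
  | succ n ih =>
    intro m paratha hm hfuel
    rw [cntFrom_eq r t m hr hm] at hfuel ⊢
    by_cases hc : r * (tri m : Int) ≤ t
    · simp only [cookInner, if_pos hc]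
      have harg : r * (tri m : Int) + ((m : Int) + 1) * r = r * (tri (m + 1) : Int) := by
        simp [tri]; push_cast; ring
      have harg2 : ((m : Int) + 1) + 1 = ((m + 1 : Nat) : Int) + 1 := by push_cast; ring
      rw [harg, harg2, ih (m + 1) (paratha + 1) (by omega) (by simp [hc] at hfuel; omega)]
      simp [hc]; push_cast; ring
    · simp only [cookInner, if_neg hc]
      simp [hc]

theorem cookInner_run (r t : Int) (hr : 1 ≤ r) (paratha : Int) :
    cookInner r t (t.toNat + 1) r 2 paratha = paratha + (cntFrom r t 1 : Int) := by
  have h1 : r = r * (tri 1 : Int) := by simp [tri]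
  have h2 : (2 : Int) = ((1 : Nat) : Int) + 1 := by norm_num
  have hb := cntFrom_bound r t (t.toNat + 1) 1 (by omega) (by omega)
  calc cookInner r t (t.toNat + 1) r 2 paratha
      = cookInner r t (t.toNat + 1) (r * (tri 1 : Int)) (((1 : Nat) : Int) + 1) paratha := by
        rw [← h1, ← h2]
    _ = paratha + (cntFrom r t 1 : Int) := cookInner_eq r t hr _ 1 paratha (le_refl 1) (by omega)

theorem canCookGo_iff (p t : Int) :
    ∀ (l : List Int) (paratha : Int), l ≠ [] → (∀ r ∈ l, 1 ≤ r) →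
      (canCookGo p t l paratha = true ↔
        p ≤ paratha + ((l.map (fun r => cntFrom r t 1)).sum : Int)) := by
  intro l
  induction l with
  | nil => intro _ h; exact absurd rfl h
  | cons r rest ih =>
    intro paratha _ hall
    have hr : 1 ≤ r := hall r (by simp)
    simp only [canCookGo]
    rw [cookInner_run r t hr paratha]
    by_cases hp : p ≤ paratha + (cntFrom r t 1 : Int)
    · simp only [if_pos hp, List.map_cons, List.sum_cons]
      exact iff_of_true trivial (by omega)
    · simp only [if_neg hp, List.map_cons, List.sum_cons]
      cases rest with
      | nil =>
        simp only [canCookGo, List.map_nil, List.sum_nil]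
        exact iff_of_false (by simp) (by omega)
      | cons a as =>
        rw [ih (paratha + (cntFrom r t 1 : Int)) (by simp) (fun x hx => hall x (by simp [hx]))]
        constructor
        · intro h; omega
        · intro h; omega

theorem canCook_iff (s : List Int) (p t : Int) (hne : s ≠ []) (hall : ∀ r ∈ s, 1 ≤ r) :
    (CanCook s p t = true ↔ p ≤ ((s.map (fun r => cntFrom r t 1)).sum : Int)) := by
  have := canCookGo_iff p t s 0 hne hall
  simpa [CanCook] using this


-- B-side: the completion times one cook contributes (first P parathas)
def cookList (r : Int) (P : Nat) : List Int := (List.range P).map (fun i => r * (tri (i + 1) : Int))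

theorem mapRange_eq_cookList (r p : Int) :
    (PySem.List.pyRange 1 (p + 1) 1).map (fun k => PySem.Int.floordiv (r * k * (k + 1)) 2)
      = cookList r p.toNat := by
  rw [PySem.List.pyRange_one, List.map_map, cookList]
  rw [show (p + 1 - 1).toNat = p.toNat from by omega]
  apply List.map_congr_left
  intro i _
  simp only [Function.comp_apply]
  have h2t : (2 : Int) * (tri (i + 1) : Int) = ((i + 1 : Nat) : Int) * (((i + 1 : Nat) : Int) + 1) := by
    exact_mod_cast two_tri (i + 1)
  have he : r * ((1 : Int) + (i : Int)) * (((1 : Int) + (i : Int)) + 1)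
      = (r * (tri (i + 1) : Int)) * 2 := by
    push_cast at h2t ⊢
    linear_combination (-r) * h2t
  rw [he, PySem.Int.floordiv_eq_ediv_of_pos (by norm_num),
    Int.mul_ediv_cancel _ (by norm_num)]

theorem countP_range_tri (r t : Int) (hr : 1 ≤ r) :
    ∀ (N m : Nat), 1 ≤ m →
      (List.range N).countP (fun i => decide (r * (tri (m + i) : Int) ≤ t))
        = min (cntFrom r t m) N := by
  intro N
  induction N with
  | zero => intro m _; simp
  | succ n ih =>
    intro m hm
    rw [List.range_succ_eq_map]
    rw [List.countP_cons, List.countP_map]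
    have e1 : ((fun i => decide (r * (tri (m + i) : Int) ≤ t)) ∘ Nat.succ)
        = fun i => decide (r * (tri (m + 1 + i) : Int) ≤ t) := by
      funext i; simp only [Function.comp_apply, Nat.succ_eq_add_one]
      rw [show m + (i + 1) = m + 1 + i from by omega]
    rw [e1]
    by_cases hc : r * (tri m : Int) ≤ t
    · rw [ih (m + 1) (by omega), cntFrom_eq r t m hr hm]
      simp only [Nat.add_zero, hc, if_pos, decide_true]
      omega
    · rw [cntFrom_eq r t m hr hm, if_neg hc]
      have hz : (List.range n).countP (fun i => decide (r * (tri (m + 1 + i) : Int) ≤ t)) = 0 := by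
        apply List.countP_eq_zero.mpr
        intro i _
        simp only [decide_eq_true_eq]
        intro hle
        exact hc (cond_upward r t hr (m := m) (k := m + 1 + i) (by omega) hle)
      rw [hz]
      simp [hc]

theorem countLE_cookList (r t : Int) (hr : 1 ≤ r) (P : Nat) :
    (cookList r P).countP (fun x => decide (x ≤ t)) = min (cntFrom r t 1) P := by
  rw [cookList, List.countP_map]
  have e1 : ((fun x => decide (x ≤ t)) ∘ (fun i => r * (tri (i + 1) : Int)))
      = fun i => decide (r * (tri (1 + i) : Int) ≤ t) := by
    funext i; simp only [Function.comp_apply]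
    rw [Nat.add_comm 1 i]
  rw [e1, countP_range_tri r t hr P 1 (le_refl 1)]

theorem countP_flatMap {α β : Type} (g : α → List β) (q : β → Bool) :
    ∀ (l : List α), (l.flatMap g).countP q = (l.map (fun a => (g a).countP q)).sum := by
  intro l
  induction l with
  | nil => simp
  | cons a as ih => simp [List.flatMap_cons, List.countP_append, ih]

theorem sum_min_iff (P : Nat) :
    ∀ (l : List Nat) (q : Nat), q ≤ P →
      ((q ≤ (l.map (fun x => min x P)).sum) ↔ q ≤ l.sum) := by
  intro l
  induction l with
  | nil => intro q _; simp
  | cons x xs ih =>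
    intro q hq
    simp only [List.map_cons, List.sum_cons]
    by_cases hqx : q ≤ x
    · constructor
      · intro _; omega
      · intro _; have : q ≤ min x P := by omega
        omega
    · have := ih (q - x) (by omega)
      omega


theorem sorted_getElem_le_iff (u : List Int) (hs : u.Pairwise (· ≤ ·)) (i : Nat)
    (hi : i < u.length) (t : Int) :
    (u[i] ≤ t ↔ i + 1 ≤ u.countP (fun x => decide (x ≤ t))) := by
  constructor
  · intro h
    have hall : ∀ x ∈ u.take (i + 1), (fun x => decide (x ≤ t)) x = true := by
      intro x hx
      obtain ⟨j, hj, hxe⟩ := List.mem_take_iff_getElem.mp hx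
      have hji : j ≤ i := by omega
      have hjx : u[j]'(by omega) ≤ u[i] := by
        rcases Nat.lt_or_ge j i with hlt | hge
        · exact List.pairwise_iff_getElem.mp hs j i (by omega) hi hlt
        · have : j = i := by omega
          subst this; exact le_refl _
      subst hxe
      simp only [decide_eq_true_eq]
      exact le_trans hjx h
    have hcnt : (u.take (i + 1)).countP (fun x => decide (x ≤ t)) = i + 1 := by
      rw [List.countP_eq_length.mpr hall, List.length_take]; omega
    conv_rhs => rw [← List.take_append_drop (i + 1) u]
    rw [List.countP_append, hcnt]
    omega
  · intro hcount
    by_contra hgt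
    push_neg at hgt
    have hdrop : u.drop i = u[i] :: u.drop (i + 1) := List.drop_eq_getElem_cons hi
    have hpd : (u.drop i).Pairwise (· ≤ ·) := hs.sublist (List.drop_sublist i u)
    rw [hdrop] at hpd
    have hhead : ∀ x ∈ u.drop (i + 1), u[i] ≤ x := (List.pairwise_cons.mp hpd).1
    have hz : (u.drop i).countP (fun x => decide (x ≤ t)) = 0 := by
      apply List.countP_eq_zero.mpr
      intro x hx
      rw [hdrop] at hx
      simp only [decide_eq_true_eq, not_le]
      rcases List.mem_cons.mp hx with hx1 | hx2
      · subst hx1; exact hgt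
      · exact lt_of_lt_of_le hgt (hhead x hx2)
    have hle : u.countP (fun x => decide (x ≤ t)) ≤ i := by
      conv_lhs => rw [← List.take_append_drop i u]
      rw [List.countP_append, hz]
      have := List.countP_le_length (p := fun x => decide (x ≤ t)) (l := u.take i)
      rw [List.length_take] at this
      omega
    omega

theorem bsGo_eq (s : List Int) (p : Int) (L : Int)
    (hmono : ∀ a b : Int, a ≤ b → CanCook s p a = true → CanCook s p b = true)
    (hL : CanCook s p L = true) (hL0 : 0 ≤ L)
    (hmin : ∀ t : Int, 0 ≤ t → t < L → CanCook s p t = false) :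
    ∀ (n : Nat) (low high ans : Int), (high + 1 - low).toNat ≤ n →
      0 ≤ low → low ≤ L → (L ≤ high ∨ ans = L) →
      bsGo s p low high ans = L := by
  intro n
  induction n with
  | zero =>
    intro low high ans hn h0 h1 h2
    have hlh : ¬ low ≤ high := by omega
    rw [bsGo, dif_neg hlh]
    omega
  | succ n ih =>
    intro low high ans hn h0 h1 h2
    by_cases hlh : low ≤ high
    · have hfd : PySem.Int.floordiv (high - low) 2 = (high - low) / 2 :=
        PySem.Int.floordiv_eq_ediv_of_pos (by omega)
      have hd0 : 0 ≤ (high - low) / 2 := Int.ediv_nonneg (by omega) (by omega)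
      have hd1 : (high - low) / 2 ≤ high - low := Int.ediv_le_self 2 (by omega)
      set mid := low + PySem.Int.floordiv (high - low) 2 with hmid
      have hm1 : low ≤ mid := by omega
      have hm2 : mid ≤ high := by omega
      rw [bsGo, dif_pos hlh]
      simp only [← hmid]
      by_cases hC : CanCook s p mid = true
      · rw [if_pos hC]
        have hLm : L ≤ mid := by
          by_contra hn2
          push_neg at hn2
          have := hmin mid (by omega) hn2
          rw [this] at hC; exact absurd hC (by simp)
        exact ih low (mid - 1) mid (by omega) h0 h1 (by omega)
      · rw [if_neg hC]
        have hmL : mid < L := by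
          by_contra hn2
          push_neg at hn2
          exact hC (hmono L mid hn2 hL)
        exact ih (mid + 1) high ans (by omega) (by omega) (by omega) h2
    · rw [bsGo, dif_neg hlh]
      omega


theorem canCook_all_of_nonpos (s : List Int) (p : Int) (hsne : s ≠ [])
    (hsall : ∀ x ∈ s, 1 ≤ x) (hp : p ≤ 0) : ∀ t : Int, CanCook s p t = true := by
  intro t
  rw [canCook_iff s p t hsne hsall]
  have := Int.natCast_nonneg ((s.map (fun r => cntFrom r t 1)).sum)
  omega

-- ===== VERDICT (by name: the statement is the Claim_ definition above) =====
theorem Roti_spec : Claim_equal_Roti := by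
  unfold Claim_equal_Roti
  intro arr p _ hpre
  unfold Spec_Roti
  simp only [Roti, Roti_alt]
  set s := PySem.List.sorted arr (fun x => x) with hs
  have hsne : s ≠ [] := by
    rw [hs]
    intro h
    exact hpre.1 ((PySem.List.sorted_eq_nil_iff arr (fun x => x) false).mp h)
  have hsall : ∀ x ∈ s, 1 ≤ x := by
    intro x hx
    exact hpre.2 x ((PySem.List.mem_sorted arr (fun x => x) false x).mp (hs ▸ hx))
  obtain ⟨m, hmax⟩ : ∃ m, PySem.List.max? s (fun x => x) = some m := by
    cases hmx : PySem.List.max? s (fun x => x) with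
    | none => exact absurd ((PySem.List.max?_eq_none_iff s (fun x => x)).mp hmx) hsne
    | some m => exact ⟨m, rfl⟩
  rw [hmax]
  dsimp only
  by_cases hp : p ≤ 0
  · rw [if_pos hp]
    have hAll := canCook_all_of_nonpos s p hsne hsall hp
    exact bsGo_eq s p 0 (fun a b _ _ => hAll b) (hAll 0) le_rfl
      (fun t h0 hlt => absurd hlt (by omega))
      ((PySem.Int.floordiv (m * p * (p + 1)) 2 + 1).toNat) 0 _ 0
      (by omega) le_rfl le_rfl (Or.inr rfl)
  · rw [if_neg hp]
    have hp1 : 1 ≤ p := by omega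
    set P := p.toNat with hP
    have hP1 : 1 ≤ P := by omega
    have hpP : (P : Int) = p := Int.toNat_of_nonneg (by omega)
    rw [show (fun r => (PySem.List.pyRange 1 (p + 1) 1).map
          (fun k => PySem.Int.floordiv (r * k * (k + 1)) 2)) = (fun r => cookList r P)
        from funext fun r => by rw [hP]; exact mapRange_eq_cookList r p]
    set times := s.flatMap (fun r => cookList r P) with htimes
    set ts := times.mergeSort (fun a b => decide (a ≤ b)) with hts
    have hperm : ts.Perm times := List.mergeSort_perm times _
    have hlen : P ≤ times.length := by
      obtain ⟨r0, rest, hcons⟩ : ∃ r0 rest, s = r0 :: rest := by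
        cases hc : s with
        | nil => exact absurd hc hsne
        | cons a b => exact ⟨a, b, rfl⟩
      rw [htimes, hcons, List.flatMap_cons, List.length_append]
      simp [cookList]
    have hlen_ts : P ≤ ts.length := by rw [hperm.length_eq]; exact hlen
    have hidx : P - 1 < ts.length := by omega
    have hPair : ts.Pairwise (· ≤ ·) := by
      have := List.sorted_mergeSort (le := fun a b : Int => decide (a ≤ b))
        (fun a b c hab hbc => by simp only [decide_eq_true_eq] at *; omega)
        (fun a b => by simp only [Bool.or_eq_true, decide_eq_true_eq]; omega) times
      simpa using this
    have hsel : ∀ t0 : Int, (ts[P - 1] ≤ t0 ↔ P ≤ ts.countP (fun x => decide (x ≤ t0))) := by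
      intro t0
      have h := sorted_getElem_le_iff ts hPair (P - 1) hidx t0
      rwa [show P - 1 + 1 = P from by omega] at h
    have hxmem : ∀ x ∈ times, 1 ≤ x ∧ x ≤ m * (tri P : Int) := by
      intro x hx
      obtain ⟨r, hrs, hxc⟩ := List.mem_flatMap.mp (htimes ▸ hx)
      obtain ⟨i, hir, hxe⟩ := List.mem_map.mp hxc
      have hi : i < P := List.mem_range.mp hir
      have hr1 : 1 ≤ r := hsall r hrs
      have hrm : r ≤ m := by simpa using PySem.List.max?_isMax hmax r hrs
      have htp : (tri (i + 1) : Int) ≤ (tri P : Int) := by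
        exact_mod_cast tri_mono (by omega)
      have ht1 : (1 : Int) ≤ (tri (i + 1) : Int) := by
        have h1 : 1 ≤ tri (i + 1) := le_trans (by omega) (le_tri (i + 1))
        exact_mod_cast h1
      subst hxe
      constructor
      · have := mul_le_mul hr1 ht1 (by norm_num) (by omega)
        simpa using this
      · calc r * (tri (i + 1) : Int) ≤ m * (tri (i + 1) : Int) :=
              mul_le_mul_of_nonneg_right hrm (by omega)
          _ ≤ m * (tri P : Int) := mul_le_mul_of_nonneg_left htp (by omega)
    have hchar : ∀ t0 : Int, (CanCook s p t0 = true ↔ ts[P - 1] ≤ t0) := by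
      intro t0
      rw [canCook_iff s p t0 hsne hsall]
      have h2 := sum_min_iff P (s.map (fun r => cntFrom r t0 1)) P le_rfl
      rw [List.map_map] at h2
      have h3 : (s.map ((fun x => min x P) ∘ (fun r => cntFrom r t0 1))).sum
          = times.countP (fun x => decide (x ≤ t0)) := by
        rw [htimes, countP_flatMap]
        congr 1
        exact List.map_congr_left (fun r hr => by
          simp only [Function.comp_apply]
          exact (countLE_cookList r t0 (hsall r hr) P).symm)
      calc p ≤ ((s.map (fun r => cntFrom r t0 1)).sum : Int)
          ↔ P ≤ (s.map (fun r => cntFrom r t0 1)).sum := by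
            rw [← hpP]; exact ⟨fun h => by exact_mod_cast h, fun h => by exact_mod_cast h⟩
        _ ↔ P ≤ (s.map ((fun x => min x P) ∘ (fun r => cntFrom r t0 1))).sum := h2.symm
        _ ↔ P ≤ ts.countP (fun x => decide (x ≤ t0)) := by rw [h3, hperm.countP_eq]
        _ ↔ ts[P - 1] ≤ t0 := (hsel t0).symm
    have hLmem : ts[P - 1] ∈ times := hperm.mem_iff.mp (List.getElem_mem hidx)
    have hL0 : 0 ≤ ts[P - 1] := by have := (hxmem _ hLmem).1; omega
    have hLhigh : ts[P - 1] ≤ m * (tri P : Int) := (hxmem _ hLmem).2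
    have hhigh : PySem.Int.floordiv (m * p * (p + 1)) 2 = m * (tri P : Int) := by
      have h2t : (2 : Int) * (tri P : Int) = (P : Int) * ((P : Int) + 1) := by
        exact_mod_cast two_tri P
      have he : m * p * (p + 1) = (m * (tri P : Int)) * 2 := by
        rw [← hpP]; linear_combination (-m) * h2t
      rw [he, PySem.Int.floordiv_eq_ediv_of_pos (by norm_num),
        Int.mul_ediv_cancel _ (by norm_num)]
    rw [hhigh]
    have hbs := bsGo_eq s p ts[P - 1]
      (fun a b hab ha => (hchar b).mpr (le_trans ((hchar a).mp ha) hab))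
      ((hchar _).mpr le_rfl) hL0
      (fun t0 h0 hlt => by
        cases hcc : CanCook s p t0 with
        | false => rfl
        | true => exact absurd ((hchar t0).mp hcc) (by omega))
      (m * (tri P : Int) + 1).toNat 0 (m * (tri P : Int)) 0
      (by omega) le_rfl hL0 (Or.inl hLhigh)
    rw [hbs]
    have hgd : PySem.List.pyGetD ts (p - 1) 0 = ts[(p - 1).toNat] := by
      apply PySem.List.pyGetD_eq_getElem
      · omega
      · have : (P : Int) ≤ (ts.length : Int) := by exact_mod_cast hlen_ts
        omega
    rw [hgd]
    congr 1
    omega
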